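-- pv_equiv track=rewrite | github.com/veratrum/aoc2020 | 21.py | findPotentialAllergens
-- ===== SOURCE A (Python) =====
-- from collections import defaultdict
--
-- def findPotentialAllergens(lines):
--     allergensReverse = defaultdict(list)
--     for line in lines:
--         ingredients, allergens = line
--         for allergen in allergens:
--             allergensReverse[allergen].append(list(ingredients))
--
--     potentialAllergens = set()
--     for allergen, ingredients in allergensReverse.items():
--         for ingredientList in ingredients:
--             for i in ingredientList:
--                 valid = True
--                 for testIngredientList in ingredients:
--                     if not i in testIngredientList:
--                         valid = False
--                 if valid:
--                     potentialAllergens.add(i)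
--
--     return potentialAllergens
-- ===== SOURCE B (Python) =====
-- def findPotentialAllergens(lines):
--     # Per allergen keep the running intersection of the ingredient sets of the
--     # lines that mention it; the answer is the union of those intersections.
--     common = {}
--     for ingredients, allergens in lines:
--         ing = set(ingredients)
--         for allergen in allergens:
--             if allergen in common:
--                 common[allergen] &= ing
--             else:
--                 common[allergen] = ing.copy()
--     result = set()
--     for s in common.values():
--         result |= s
--     return result
-- ===== Notes on version B (the rewrite author's own statement) =====
-- stated objective: faster
-- what changed: Instead of collecting every ingredient list per allergen and then testing each ingredient against every list of that allergen (nested quadratic scan), B maintains one running set intersection per allergen in a single pass over the lines and unions the intersections.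
import Mathlib
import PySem

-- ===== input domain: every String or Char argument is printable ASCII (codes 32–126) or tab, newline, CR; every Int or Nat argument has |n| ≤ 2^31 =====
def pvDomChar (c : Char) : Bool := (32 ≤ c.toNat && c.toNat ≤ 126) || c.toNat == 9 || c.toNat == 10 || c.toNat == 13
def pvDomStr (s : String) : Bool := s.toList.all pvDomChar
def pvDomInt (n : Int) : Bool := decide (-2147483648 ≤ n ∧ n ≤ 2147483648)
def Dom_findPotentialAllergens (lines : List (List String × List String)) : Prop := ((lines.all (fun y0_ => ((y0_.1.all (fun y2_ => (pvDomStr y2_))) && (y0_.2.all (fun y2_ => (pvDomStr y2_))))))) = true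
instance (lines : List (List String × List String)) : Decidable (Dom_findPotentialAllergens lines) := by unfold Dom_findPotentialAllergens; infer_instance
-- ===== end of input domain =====

-- B replaces A's nested per-allergen membership scans by one running set
-- intersection per allergen, built in a single pass, then unioned (faster).

-- ===== PORT A =====
def findPotentialAllergens (lines : List (List String × List String)) : List String :=
  let allergensReverse : PySem.Dict String (List (List String)) :=
    lines.foldl (fun d line =>
      line.2.foldl (fun d allergen =>
        d.insert allergen (d.getD allergen [] ++ [line.1])) d) PySem.Dict.empty
  allergensReverse.items.foldl (fun pot item =>
    item.2.foldl (fun pot ingredientList =>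
      ingredientList.foldl (fun pot i =>
        let valid := item.2.foldl (fun valid t => if !(t.contains i) then false else valid) true
        if valid then PySem.Set.add pot i else pot) pot) pot) PySem.Set.empty

-- ===== PORT B =====
def findPotentialAllergens_alt (lines : List (List String × List String)) : List String :=
  let common : PySem.Dict String (PySem.Set String) :=
    lines.foldl (fun d line =>
      let ing := PySem.Set.ofList line.1
      line.2.foldl (fun d allergen =>
        match d.get? allergen with
        | some s => d.insert allergen (PySem.Set.inter s ing)
        | none   => d.insert allergen ing) d) PySem.Dict.empty
  common.values.foldl (fun result s => PySem.Set.union result s) PySem.Set.empty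

-- ===== PRECONDITION & SPEC =====
def Spec_findPotentialAllergens (lines : List (List String × List String)) (out : List String) : Prop := out = findPotentialAllergens_alt lines
instance (lines : List (List String × List String)) (out : List String) : Decidable (Spec_findPotentialAllergens lines out) := by unfold Spec_findPotentialAllergens; infer_instance

-- ===== CLAIM (what is proved, stated in full; the proofs are below) =====
def Claim_equal_findPotentialAllergens : Prop := ∀ (lines : List (List String × List String)), Dom_findPotentialAllergens lines → Spec_findPotentialAllergens lines (findPotentialAllergens lines)

-- ===== LEMMAS AND PROOFS =====

-- the value B keeps per allergen, expressed from A's per-allergen list of ingredient lists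
def pvInterAll (vs : List (List String)) : PySem.Set String :=
  match vs with
  | [] => PySem.Set.empty
  | l :: rest => rest.foldl (fun acc l' => PySem.Set.inter acc (PySem.Set.ofList l')) (PySem.Set.ofList l)

-- invariant tying A's / B's per-allergen dictionaries together
def pvInv (dA : PySem.Dict String (List (List String))) (dB : PySem.Dict String (PySem.Set String)) : Prop :=
  dB.items = dA.items.map (fun p => (p.1, pvInterAll p.2)) ∧ ∀ p ∈ dA.items, p.2 ≠ []

theorem pv_valid_eq (vs : List (List String)) (i : String) :
    vs.foldl (fun valid t => if !(t.contains i) then false else valid) true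
      = vs.all (fun t => t.contains i) := by
  rw [PySem.List.foldl_if_false_eq]
  simp [List.all_eq_not_any_not]

theorem pv_update_of_subset (s : PySem.Set String) (xs : List String) (h : ∀ x ∈ xs, x ∈ s) :
    PySem.Set.update s xs = s := by
  induction xs generalizing s with
  | nil => exact PySem.Set.update_nil s
  | cons x xs ih =>
    rw [PySem.Set.update_cons, PySem.Set.add_of_mem (h x (by simp))]
    exact ih s (fun y hy => h y (by simp [hy]))

theorem pv_update_foldl (xs : List String) (s acc : PySem.Set String) :
    PySem.Set.update s (xs.foldl PySem.Set.add acc) = PySem.Set.update (PySem.Set.update s acc) xs := by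
  induction xs generalizing acc with
  | nil => simp [PySem.Set.update_nil]
  | cons x xs ih =>
    rw [List.foldl_cons, ih, PySem.Set.update_cons]
    congr 1
    by_cases hx : acc.contains x
    · rw [PySem.Set.add_of_mem (by rwa [PySem.Set.contains_iff] at hx),
        PySem.Set.add_of_mem]
      rw [PySem.Set.mem_update]
      right; rwa [PySem.Set.contains_iff] at hx
    · show PySem.Set.update s (PySem.Set.add acc x) = _
      rw [PySem.Set.add, if_neg hx, PySem.Set.update_append, PySem.Set.update_cons, PySem.Set.update_nil]

theorem pv_update_ofList (s : PySem.Set String) (xs : List String) :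
    PySem.Set.update s (PySem.Set.ofList xs) = PySem.Set.update s xs := by
  rw [PySem.Set.ofList, PySem.Set.empty, pv_update_foldl, PySem.Set.update_nil]

theorem pv_filter_add (q : String → Bool) (s : PySem.Set String) (x : String) :
    List.filter q (PySem.Set.add s x) = if q x then PySem.Set.add (List.filter q s) x else List.filter q s := by
  rw [PySem.Set.add]
  by_cases hx : s.contains x
  · rw [if_pos hx]
    by_cases hq : q x
    · rw [if_pos hq, PySem.Set.add_of_mem]
      rw [List.mem_filter]
      exact ⟨by rwa [PySem.Set.contains_iff] at hx, hq⟩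
    · rw [if_neg hq]
  · rw [if_neg hx, List.filter_append]
    by_cases hq : q x
    · rw [if_pos hq, List.filter_cons, if_pos hq, List.filter_nil, PySem.Set.add, if_neg]
      simp only [PySem.Set.contains, List.contains_iff_exists_mem_beq] at hx ⊢
      intro ⟨y, hy, hb⟩
      exact hx ⟨y, (List.mem_filter.mp hy).1, hb⟩
    · rw [if_neg hq, List.filter_cons, if_neg hq, List.filter_nil, List.append_nil]

theorem pv_filter_foldl (q : String → Bool) (xs : List String) (acc : PySem.Set String) :
    List.filter q (xs.foldl PySem.Set.add acc) = (xs.filter q).foldl PySem.Set.add (List.filter q acc) := by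
  induction xs generalizing acc with
  | nil => simp
  | cons x xs ih =>
    rw [List.foldl_cons, ih, pv_filter_add, List.filter_cons]
    by_cases hq : q x
    · rw [if_pos hq, if_pos hq, List.foldl_cons]
    · rw [if_neg hq, if_neg hq]

theorem pv_filter_ofList (q : String → Bool) (xs : List String) :
    PySem.Set.ofList (xs.filter q) = List.filter q (PySem.Set.ofList xs) := by
  rw [PySem.Set.ofList, PySem.Set.ofList, PySem.Set.empty, pv_filter_foldl, List.filter_nil]

theorem pv_inter_foldl (rest : List (List String)) (s : PySem.Set String) :
    rest.foldl (fun acc l' => PySem.Set.inter acc (PySem.Set.ofList l')) s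
      = List.filter (fun i => rest.all (fun t => t.contains i)) s := by
  induction rest generalizing s with
  | nil => simp
  | cons l rest ih =>
    rw [List.foldl_cons, ih, PySem.Set.inter, List.filter_filter]
    apply List.filter_congr
    intro i _
    simp [PySem.Set.contains, PySem.Set.mem_ofList, Bool.and_comm]

theorem pv_interAll_eq (v : List String) (rest : List (List String)) :
    pvInterAll (v :: rest)
      = PySem.Set.ofList (v.filter (fun i => (v :: rest).all (fun t => t.contains i))) := by
  rw [pv_filter_ofList, pvInterAll, pv_inter_foldl]
  apply List.filter_congr
  intro i hi
  rw [PySem.Set.mem_ofList] at hi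
  simp [hi]

theorem pv_get?_map (ps : List (String × List (List String))) (k : String) :
    (PySem.Dict.mk (ps.map (fun p => (p.1, pvInterAll p.2)))).get? k
      = ((PySem.Dict.mk ps).get? k).map pvInterAll := by
  induction ps with
  | nil => simp [PySem.Dict.get?]
  | cons p ps ih =>
    rw [List.map_cons, PySem.Dict.get?_mk_cons, PySem.Dict.get?_mk_cons]
    by_cases h : p.1 == k
    · rw [if_pos h, if_pos h, Option.map_some]
    · rw [if_neg h, if_neg h, ih]

theorem pv_contains_map (ps : List (String × List (List String))) (k : String) :
    (PySem.Dict.mk (ps.map (fun p => (p.1, pvInterAll p.2)))).contains k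
      = (PySem.Dict.mk ps).contains k := by
  rw [PySem.Dict.contains_mk, PySem.Dict.contains_mk, List.any_map]
  rfl

theorem pv_interAll_snoc (v : List String) (rest : List (List String)) (l : List String) :
    pvInterAll ((v :: rest) ++ [l]) = PySem.Set.inter (pvInterAll (v :: rest)) (PySem.Set.ofList l) := by
  simp [pvInterAll, List.foldl_append]

theorem pv_get?_some_mem {d : PySem.Dict String (List (List String))} {k : String}
    {v : List (List String)} (h : d.get? k = some v) : ∃ p ∈ d.items, p.2 = v := by
  rw [PySem.Dict.get?] at h
  rw [Option.map_eq_some_iff] at h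
  obtain ⟨p, hp, rfl⟩ := h
  exact ⟨p, List.mem_of_find?_eq_some hp, rfl⟩

theorem pv_inv_step (l : List String) (a : String) (dA : PySem.Dict String (List (List String)))
    (dB : PySem.Dict String (PySem.Set String)) (h : pvInv dA dB) :
    pvInv (dA.insert a (dA.getD a [] ++ [l]))
      (match dB.get? a with
       | some s => dB.insert a (PySem.Set.inter s (PySem.Set.ofList l))
       | none   => dB.insert a (PySem.Set.ofList l)) := by
  obtain ⟨hmap, hne⟩ := h
  have hdB : dB = PySem.Dict.mk (dA.items.map (fun p => (p.1, pvInterAll p.2))) :=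
    PySem.Dict.ext hmap
  subst hdB
  have hget : (PySem.Dict.mk (dA.items.map (fun p => (p.1, pvInterAll p.2)))).get? a
      = (dA.get? a).map pvInterAll := pv_get?_map dA.items a
  have hcon : (PySem.Dict.mk (dA.items.map (fun p => (p.1, pvInterAll p.2)))).contains a
      = dA.contains a := pv_contains_map dA.items a
  cases hA : dA.get? a with
  | none =>
    have hcA : dA.contains a = false := (PySem.Dict.get?_eq_none_iff_contains dA a).mp hA
    rw [hget, hA]
    simp only [Option.map_none]
    have hD : dA.getD a [] = [] := by
      rw [PySem.Dict.getD_eq_get?_getD, hA]; rfl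
    rw [hD]
    constructor
    · rw [PySem.Dict.items_insert_of_not_contains _ _ (by rw [hcon]; exact hcA),
        PySem.Dict.items_insert_of_not_contains _ _ hcA, List.map_append]
      rfl
    · intro p hp
      rw [PySem.Dict.items_insert_of_not_contains _ _ hcA, List.mem_append] at hp
      rcases hp with hp | hp
      · exact hne p hp
      · simp only [List.mem_singleton] at hp
        subst hp
        simp
  | some vs =>
    obtain ⟨q, hq, hq2⟩ := pv_get?_some_mem hA
    obtain ⟨v, rest, rfl⟩ : ∃ v rest, vs = v :: rest := by
      cases hvs : vs with
      | nil => exact absurd (hq2.trans hvs) (hne q hq)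
      | cons v rest => exact ⟨v, rest, rfl⟩
    have hcA : dA.contains a = true := by
      rw [PySem.Dict.contains_eq_isSome_get?, hA]; rfl
    rw [hget, hA]
    simp only [Option.map_some]
    have hD : dA.getD a [] = v :: rest := by
      rw [PySem.Dict.getD_eq_get?_getD, hA]; rfl
    rw [hD]
    constructor
    · rw [PySem.Dict.items_insert_of_contains _ _ (by rw [hcon]; exact hcA),
        PySem.Dict.items_insert_of_contains _ _ hcA, List.map_map, List.map_map]
      apply List.map_congr_left
      intro p _
      by_cases hp : p.1 == a
      · simp only [Function.comp_apply, hp, if_pos, ← pv_interAll_snoc]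
      · simp only [Function.comp_apply, hp, Bool.false_eq_true, if_false]
    · intro p hp
      rw [PySem.Dict.items_insert_of_contains _ _ hcA, List.mem_map] at hp
      obtain ⟨p0, hp0, rfl⟩ := hp
      by_cases hp1 : p0.1 == a
      · simp only [hp1, if_pos]
        simp
      · simp only [hp1, Bool.false_eq_true, if_false]
        exact hne p0 hp0

theorem pv_fold_id (q : String → Bool) (rest : List (List String)) (s : PySem.Set String)
    (h : ∀ x, q x = true → x ∈ s) :
    rest.foldl (fun pot l => PySem.Set.update pot (l.filter q)) s = s := by
  induction rest with
  | nil => rfl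
  | cons l rest ih =>
    rw [List.foldl_cons, pv_update_of_subset s (l.filter q)
      (fun x hx => h x (List.mem_filter.mp hx).2)]
    exact ih

theorem pv_perAllergen (pot : PySem.Set String) (vs : List (List String)) (hvs : vs ≠ []) :
    vs.foldl (fun pot ingredientList =>
      ingredientList.foldl (fun pot i =>
        let valid := vs.foldl (fun valid t => if !(t.contains i) then false else valid) true
        if valid then PySem.Set.add pot i else pot) pot) pot
      = PySem.Set.union pot (pvInterAll vs) := by
  have hstep : (fun (pot : PySem.Set String) (l : List String) =>
      l.foldl (fun pot i =>
        let valid := vs.foldl (fun valid t => if !(t.contains i) then false else valid) true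
        if valid then PySem.Set.add pot i else pot) pot)
    = fun pot l => PySem.Set.update pot (l.filter (fun i => vs.all (fun t => t.contains i))) := by
    funext pot l
    simp only [pv_valid_eq]
    rw [PySem.Set.update, ← PySem.List.foldl_if_eq_foldl_filter]
  rw [hstep]
  obtain ⟨v, rest, rfl⟩ : ∃ v rest, vs = v :: rest := by
    cases vs with
    | nil => exact absurd rfl hvs
    | cons v rest => exact ⟨v, rest, rfl⟩
  rw [PySem.Set.union_eq_update, pv_interAll_eq, pv_update_ofList, List.foldl_cons]
  apply pv_fold_id
  intro x hx
  rw [PySem.Set.mem_update]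
  right
  rw [List.mem_filter]
  refine ⟨?_, hx⟩
  rw [List.all_cons, Bool.and_eq_true] at hx
  exact List.contains_iff_mem.mp hx.1

theorem pv_inv_line (line : List String × List String) (as0 : List String)
    (dA : PySem.Dict String (List (List String))) (dB : PySem.Dict String (PySem.Set String))
    (h : pvInv dA dB) :
    pvInv (as0.foldl (fun d allergen => d.insert allergen (d.getD allergen [] ++ [line.1])) dA)
      (as0.foldl (fun d allergen =>
        match d.get? allergen with
        | some s => d.insert allergen (PySem.Set.inter s (PySem.Set.ofList line.1))
        | none   => d.insert allergen (PySem.Set.ofList line.1)) dB) := by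
  induction as0 generalizing dA dB with
  | nil => exact h
  | cons a as0 ih => exact ih _ _ (pv_inv_step line.1 a dA dB h)

theorem pv_inv_lines (lines : List (List String × List String))
    (dA : PySem.Dict String (List (List String))) (dB : PySem.Dict String (PySem.Set String))
    (h : pvInv dA dB) :
    pvInv (lines.foldl (fun d line =>
        line.2.foldl (fun d allergen => d.insert allergen (d.getD allergen [] ++ [line.1])) d) dA)
      (lines.foldl (fun d line =>
        line.2.foldl (fun d allergen =>
          match d.get? allergen with
          | some s => d.insert allergen (PySem.Set.inter s (PySem.Set.ofList line.1))
          | none   => d.insert allergen (PySem.Set.ofList line.1)) d) dB) := by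
  induction lines generalizing dA dB with
  | nil => exact h
  | cons line lines ih => exact ih _ _ (pv_inv_line line line.2 dA dB h)

theorem pv_phase2 (dA : PySem.Dict String (List (List String)))
    (dB : PySem.Dict String (PySem.Set String)) (h : pvInv dA dB) :
    dA.items.foldl (fun pot item =>
      item.2.foldl (fun pot ingredientList =>
        ingredientList.foldl (fun pot i =>
          let valid := item.2.foldl (fun valid t => if !(t.contains i) then false else valid) true
          if valid then PySem.Set.add pot i else pot) pot) pot) PySem.Set.empty
      = dB.values.foldl (fun result s => PySem.Set.union result s) PySem.Set.empty := by
  obtain ⟨hmap, hne⟩ := h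
  have hv : dB.values = dA.items.map (fun p => pvInterAll p.2) := by
    rw [PySem.Dict.values, hmap, List.map_map]
    rfl
  rw [hv, List.foldl_map]
  apply PySem.List.foldl_congr_mem
  intro pot p hp
  exact pv_perAllergen pot p.2 (hne p hp)

-- ===== VERDICT (by name: the statement is the Claim_ definition above) =====
theorem findPotentialAllergens_spec : Claim_equal_findPotentialAllergens := by
  intro lines _
  show findPotentialAllergens lines = findPotentialAllergens_alt lines
  exact pv_phase2 _ _
    (pv_inv_lines lines PySem.Dict.empty PySem.Dict.empty ⟨rfl, by intro p hp; cases hp⟩)
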